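-- pv_equiv track=rewrite | github.com/BolluHimana/CP-2 | 10-destructiveshortenlongruns-Python/destructiveshortenlongruns.py | destructiveshortenlongruns
-- ===== SOURCE A (Python) =====
-- def destructiveshortenlongruns(L, k):
-- 	a=0
-- 	b=0
-- 	n=0
-- 	while a<len(L):
-- 		if n==L[a]:
-- 			b=b+1
-- 			if b>=k:
-- 				L.pop(a)
-- 				a-=1
-- 		elif a==0:
-- 			n=L[a]
-- 			b=b+1
-- 		else:
-- 			n=L[a]
-- 			b=1
-- 		a=a+1
-- 	return L
-- ===== SOURCE B (Python) =====
-- def destructiveshortenlongruns(L, k):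
-- 	out = []
-- 	prev = None
-- 	count = 0
-- 	for x in L:
-- 		if prev is not None and x == prev:
-- 			count += 1
-- 			if count < k:
-- 				out.append(x)
-- 		else:
-- 			prev = x
-- 			count = 1
-- 			out.append(x)
-- 	L[:] = out
-- 	return L
-- ===== Notes on version B (the rewrite author's own statement) =====
-- stated objective: alternative
-- what changed: Replaced the in-place while loop with repeated list.pop(a) and index adjustment by a single forward pass that tracks the current run's value and length and appends only the first k-1 elements of each run to a fresh output list.
-- intended difference: When k <= 1 and L starts with 0, A's uninitialised run sentinel n=0 makes it delete the entire leading run of zeros (e.g. A([0,0,3],1)=[3]), while B keeps one element of every run including the leading zero run (B([0,0,3],1)=[0,3]); treating all runs alike is the intended behaviour, the zero sentinel is an accident. — e.g. on destructiveshortenlongruns([0, 0, 3], 1): A returns [3], B returns [0, 3]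
import Mathlib
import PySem

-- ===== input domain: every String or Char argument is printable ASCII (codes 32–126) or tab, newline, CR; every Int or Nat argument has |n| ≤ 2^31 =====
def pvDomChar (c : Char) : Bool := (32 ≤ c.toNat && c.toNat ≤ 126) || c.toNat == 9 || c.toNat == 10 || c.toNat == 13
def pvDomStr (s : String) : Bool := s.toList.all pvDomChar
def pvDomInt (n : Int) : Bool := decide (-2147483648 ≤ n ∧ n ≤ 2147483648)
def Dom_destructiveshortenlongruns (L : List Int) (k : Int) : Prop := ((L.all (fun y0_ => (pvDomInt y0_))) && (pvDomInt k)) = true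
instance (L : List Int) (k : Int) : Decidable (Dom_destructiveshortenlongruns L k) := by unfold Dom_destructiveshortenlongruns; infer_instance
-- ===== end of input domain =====

-- B replaces A's in-place pop loop by a single forward pass building a fresh list; equivalence is
-- about the return value (A mutates L in place; Python B performs the same mutation via L[:] = out).

-- ===== PORT A =====
-- Python's while loop over mutable state (L, a, b, n); fuel 2*|L|+1 bounds the iteration count
-- (each iteration either advances a or shortens L), so the fuel guard never fires on the entry call.
def pvLoopA (k : Int) : Nat → List Int → Int → Int → Int → List Int
  | 0, L, _, _, _ => L
  | fuel + 1, L, a, b, n =>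
    if a < (L.length : Int) then
      match PySem.List.pyGet? L a with
      | none => L   -- unreachable: 0 ≤ a < len L on every reached state
      | some x =>
        if n = x then
          if b + 1 ≥ k then
            match PySem.List.pop? L a with
            | none => L   -- unreachable, same index
            | some (_, L') => pvLoopA k fuel L' (a - 1 + 1) (b + 1) n
          else pvLoopA k fuel L (a + 1) (b + 1) n
        else if a = 0 then pvLoopA k fuel L (a + 1) (b + 1) x
        else pvLoopA k fuel L (a + 1) 1 x
    else L

def destructiveshortenlongruns (L : List Int) (k : Int) : List Int :=
  pvLoopA k (2 * L.length + 1) L 0 0 0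

-- ===== PORT B =====
-- B's for-loop: state (prev, count), emit x unless it repeats prev for the k-th (or later) time.
def pvLoopB (k : Int) : List Int → Option Int → Int → List Int
  | [], _, _ => []
  | x :: xs, prev, count =>
    if prev = some x then
      if count + 1 < k then x :: pvLoopB k xs prev (count + 1)
      else pvLoopB k xs prev (count + 1)
    else x :: pvLoopB k xs (some x) 1

def destructiveshortenlongruns_alt (L : List Int) (k : Int) : List Int :=
  pvLoopB k L none 0

-- ===== PRECONDITION & SPEC =====
-- When k ≤ 1 and L starts with 0, A's uninitialised sentinel n=0 deletes the whole leading run of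
-- zeros, while B keeps one element of every run including that one; treating all runs alike is intended.
def D_destructiveshortenlongruns (L : List Int) (k : Int) : Prop := k ≤ 1 ∧ L.head? = some 0
instance (L : List Int) (k : Int) : Decidable (D_destructiveshortenlongruns L k) := by
  unfold D_destructiveshortenlongruns; infer_instance

def Spec_destructiveshortenlongruns (L : List Int) (k : Int) (out : List Int) : Prop :=
  ¬ D_destructiveshortenlongruns L k → out = destructiveshortenlongruns_alt L k
instance (L : List Int) (k : Int) (out : List Int) : Decidable (Spec_destructiveshortenlongruns L k out) := by
  unfold Spec_destructiveshortenlongruns; infer_instance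

def pvDiffWitness_destructiveshortenlongruns : List Int × Int := ([0, 0, 3], 1)
def pvDiffWitnessOut_destructiveshortenlongruns : (List Int) × (List Int) := ([3], [0, 3])

-- ===== CLAIM (what is proved, stated in full; the proofs are below) =====
def Claim_unchanged_destructiveshortenlongruns : Prop := ∀ (L : List Int) (k : Int), Dom_destructiveshortenlongruns L k → Spec_destructiveshortenlongruns L k (destructiveshortenlongruns L k)
def Claim_changed_destructiveshortenlongruns : Prop := Dom_destructiveshortenlongruns (pvDiffWitness_destructiveshortenlongruns.1) (pvDiffWitness_destructiveshortenlongruns.2) ∧ D_destructiveshortenlongruns (pvDiffWitness_destructiveshortenlongruns.1) (pvDiffWitness_destructiveshortenlongruns.2) ∧ destructiveshortenlongruns (pvDiffWitness_destructiveshortenlongruns.1) (pvDiffWitness_destructiveshortenlongruns.2) = pvDiffWitnessOut_destructiveshortenlongruns.1 ∧ destructiveshortenlongruns_alt (pvDiffWitness_destructiveshortenlongruns.1) (pvDiffWitness_destructiveshortenlongruns.2) = pvDiffWitnessOut_destructiveshortenlongruns.2 ∧ pvDiffWitnessOut_destructiveshortenlongruns.1 ≠ pvDiffWitnessOut_dest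ructiveshortenlongruns.2
def Claim_exact_destructiveshortenlongruns : Prop := ∀ (L : List Int) (k : Int), Dom_destructiveshortenlongruns L k → D_destructiveshortenlongruns L k → destructiveshortenlongruns L k ≠ destructiveshortenlongruns_alt L k

-- ===== LEMMAS AND PROOFS =====

-- One-step unfolding of A's loop when the index is in range.
theorem pvLoopA_step (k : Int) (f : Nat) (L : List Int) (a b n x : Int)
    (hguard : a < (L.length : Int)) (hget : PySem.List.pyGet? L a = some x) :
    pvLoopA k (f + 1) L a b n =
      if n = x then
        if b + 1 ≥ k then
          match PySem.List.pop? L a with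
          | none => L
          | some (_, L') => pvLoopA k f L' (a - 1 + 1) (b + 1) n
        else pvLoopA k f L (a + 1) (b + 1) n
      else if a = 0 then pvLoopA k f L (a + 1) (b + 1) x
      else pvLoopA k f L (a + 1) 1 x := by
  rw [pvLoopA, if_pos hguard, hget]

theorem pvEraseIdx_append_cons {y : Int} (xs : List Int) : ∀ (P : List Int),
    (P ++ y :: xs).eraseIdx P.length = P ++ xs := by
  intro P
  induction P with
  | nil => rfl
  | cons p P ih => simpa [List.eraseIdx] using ih

-- Main invariant: from a state whose processed prefix P is nonempty, A's loop keeps P and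
-- processes the suffix exactly like B's loop with prev = some n.
theorem pvLoopA_invariant (k : Int) (xs : List Int) : ∀ (fuel : Nat) (P : List Int) (b n : Int),
    2 * xs.length + 1 ≤ fuel → P ≠ [] →
    pvLoopA k fuel (P ++ xs) (P.length : Int) b n = P ++ pvLoopB k xs (some n) b := by
  induction xs with
  | nil =>
    intro fuel P b n hfuel _
    obtain ⟨f, rfl⟩ : ∃ f, fuel = f + 1 := ⟨fuel - 1, by omega⟩
    simp [pvLoopA, pvLoopB]
  | cons x xs ih =>
    intro fuel P b n hfuel hP
    obtain ⟨f, rfl⟩ : ∃ f, fuel = f + 1 := ⟨fuel - 1, by omega⟩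
    have hguard : (P.length : Int) < ((P ++ x :: xs).length : Int) := by
      simp only [List.length_append, List.length_cons]; push_cast; omega
    rw [pvLoopA_step k f (P ++ x :: xs) (P.length : Int) b n x hguard
        (PySem.List.pyGet?_append_length P xs x)]
    by_cases hnx : n = x
    · subst hnx
      by_cases hb : b + 1 ≥ k
      · have hlen : P.length < (P ++ n :: xs).length := by simp
        have hpop : PySem.List.pop? (P ++ n :: xs) (P.length : Int) = some (n, P ++ xs) := by
          rw [PySem.List.pop?_natCast (P ++ n :: xs) P.length hlen]
          simp [pvEraseIdx_append_cons]
        rw [if_pos rfl, if_pos hb, hpop]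
        have ha : (P.length : Int) - 1 + 1 = (P.length : Int) := by ring
        rw [ha]
        show pvLoopA k f (P ++ xs) (P.length : Int) (b + 1) n = _
        rw [ih f P (b + 1) n (by simp at hfuel ⊢; omega) hP]
        simp [pvLoopB, show ¬ b + 1 < k by omega]
      · rw [if_pos rfl, if_neg hb]
        have h1 : (P.length : Int) + 1 = (((P ++ [n]).length : Nat) : Int) := by simp
        have h2 : P ++ n :: xs = (P ++ [n]) ++ xs := by simp
        rw [h1, h2, ih f (P ++ [n]) (b + 1) n (by simp at hfuel ⊢; omega) (by simp)]
        simp [pvLoopB, show b + 1 < k by omega]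
    · have ha0 : ¬ (P.length : Int) = 0 := by
        simpa [List.length_eq_zero_iff] using hP
      rw [if_neg hnx, if_neg ha0]
      have h1 : (P.length : Int) + 1 = (((P ++ [x]).length : Nat) : Int) := by simp
      have h2 : P ++ x :: xs = (P ++ [x]) ++ xs := by simp
      rw [h1, h2, ih f (P ++ [x]) 1 x (by simp at hfuel ⊢; omega) (by simp)]
      have : ¬ (some n = some x) := by simpa using hnx
      simp [pvLoopB, this]

-- For k ≤ 1, from an a = 0 state with sentinel n = 0 and b ≥ 0, A's result never starts with 0.
theorem pvLoopA_head_ne_zero (k : Int) (hk : k ≤ 1) (L : List Int) : ∀ (fuel : Nat) (b : Int),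
    2 * L.length + 1 ≤ fuel → 0 ≤ b →
    (pvLoopA k fuel L 0 b 0).head? ≠ some 0 := by
  induction L with
  | nil =>
    intro fuel b hfuel _
    obtain ⟨f, rfl⟩ : ∃ f, fuel = f + 1 := ⟨fuel - 1, by omega⟩
    simp [pvLoopA]
  | cons x xs ih =>
    intro fuel b hfuel hb
    obtain ⟨f, rfl⟩ : ∃ f, fuel = f + 1 := ⟨fuel - 1, by omega⟩
    have hguard : (0 : Int) < (((x :: xs).length : Nat) : Int) := by simp
    rw [pvLoopA_step k f (x :: xs) 0 b 0 x hguard (PySem.List.pyGet?_zero_cons x xs)]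
    by_cases hx : (0 : Int) = x
    · rw [if_pos hx, if_pos (by omega : b + 1 ≥ k), PySem.List.pop?_zero_cons x xs]
      show (pvLoopA k f xs ((0 : Int) - 1 + 1) (b + 1) 0).head? ≠ some 0
      rw [show (0 : Int) - 1 + 1 = 0 by ring]
      exact ih f (b + 1) (by simp at hfuel ⊢; omega) (by omega)
    · rw [if_neg hx, if_pos rfl]
      have hinv := pvLoopA_invariant k xs f [x] (b + 1) x (by simp at hfuel ⊢; omega) (by simp)
      show (pvLoopA k f ([x] ++ xs) (([x].length : Nat) : Int) (b + 1) x).head? ≠ some 0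
      rw [hinv]
      simpa using fun h => hx h.symm

theorem destructiveshortenlongruns_spec : Claim_unchanged_destructiveshortenlongruns := by
  intro L k _ hnd
  unfold destructiveshortenlongruns destructiveshortenlongruns_alt
  unfold D_destructiveshortenlongruns at hnd
  match L with
  | [] => simp [pvLoopA, pvLoopB]
  | x :: xs =>
    have hguard : (0 : Int) < (((x :: xs).length : Nat) : Int) := by simp
    rw [show 2 * (x :: xs).length + 1 = (2 * xs.length + 2) + 1 by simp; omega]
    rw [pvLoopA_step k (2 * xs.length + 2) (x :: xs) 0 0 0 x hguard
        (PySem.List.pyGet?_zero_cons x xs)]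
    have hinv := pvLoopA_invariant k xs (2 * xs.length + 2) [x] 1 x (by omega) (by simp)
    by_cases hx : (0 : Int) = x
    · have hk2 : ¬ k ≤ 1 := fun hk => hnd ⟨hk, by simp [← hx]⟩
      rw [if_pos hx, if_neg (by omega : ¬ (0 : Int) + 1 ≥ k)]
      show pvLoopA k (2 * xs.length + 2) ([x] ++ xs) (([x].length : Nat) : Int) (0 + 1) 0 = _
      rw [show (0 : Int) + 1 = 1 by ring, show (0 : Int) = x from hx, hinv]
      have : ¬ ((none : Option Int) = some x) := by simp
      simp [pvLoopB, this]
    · rw [if_neg hx, if_pos rfl]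
      show pvLoopA k (2 * xs.length + 2) ([x] ++ xs) (([x].length : Nat) : Int) (0 + 1) x = _
      rw [show (0 : Int) + 1 = 1 by ring, hinv]
      have : ¬ ((none : Option Int) = some x) := by simp
      simp [pvLoopB, this]

theorem destructiveshortenlongruns_changed : Claim_changed_destructiveshortenlongruns := by
  unfold Claim_changed_destructiveshortenlongruns; decide

theorem destructiveshortenlongruns_tight : Claim_exact_destructiveshortenlongruns := by
  intro L k _ hd
  obtain ⟨hk, hh⟩ := hd
  match L with
  | x :: xs =>
    have hx : x = 0 := by simpa using hh
    subst hx
    intro heq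
    have hA := pvLoopA_head_ne_zero k hk (0 :: xs) (2 * (0 :: xs).length + 1) 0 (le_refl _) (le_refl _)
    have hB : (destructiveshortenlongruns_alt (0 :: xs) k).head? = some 0 := by
      unfold destructiveshortenlongruns_alt
      have : ¬ ((none : Option Int) = some (0 : Int)) := by simp
      simp [pvLoopB, this]
    rw [destructiveshortenlongruns] at heq
    rw [heq, hB] at hA
    exact hA rfl
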